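-- pv_equiv track=rewrite | github.com/MTL-CODE/MTL-TRANSFER | fault_localization/MTL_model/data_util/data.py | afterfix2sents
-- ===== SOURCE A (Python) =====
-- SENTENCE_START = '<s>'
--
-- SENTENCE_END = '</s>'
--
-- def afterfix2sents(afterfix):
--   cur = 0
--   sents = []
--   while True:
--     try:
--       start_p = afterfix.index(SENTENCE_START, cur)
--       end_p = afterfix.index(SENTENCE_END, start_p + 1)
--       cur = end_p + len(SENTENCE_END)
--       sents.append(afterfix[start_p+len(SENTENCE_START):end_p])
--     except ValueError as e:
--       return sents
-- ===== SOURCE B (Python) =====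
-- SENTENCE_START = '<s>'
--
-- SENTENCE_END = '</s>'
--
-- def afterfix2sents(afterfix):
--     sents = []
--     rest = afterfix
--     while True:
--         _pre, sep, after = rest.partition(SENTENCE_START)
--         if not sep:
--             return sents
--         body, sep2, rest = after.partition(SENTENCE_END)
--         if not sep2:
--             return sents
--         sents.append(body)
-- ===== Notes on version B (the rewrite author's own statement) =====
-- stated objective: idiomatic
-- what changed: Replaces the index-cursor while/try loop with repeated str.partition on the shrinking suffix: B never tracks positions in the full string and needs no exception handling.
import Mathlib
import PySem

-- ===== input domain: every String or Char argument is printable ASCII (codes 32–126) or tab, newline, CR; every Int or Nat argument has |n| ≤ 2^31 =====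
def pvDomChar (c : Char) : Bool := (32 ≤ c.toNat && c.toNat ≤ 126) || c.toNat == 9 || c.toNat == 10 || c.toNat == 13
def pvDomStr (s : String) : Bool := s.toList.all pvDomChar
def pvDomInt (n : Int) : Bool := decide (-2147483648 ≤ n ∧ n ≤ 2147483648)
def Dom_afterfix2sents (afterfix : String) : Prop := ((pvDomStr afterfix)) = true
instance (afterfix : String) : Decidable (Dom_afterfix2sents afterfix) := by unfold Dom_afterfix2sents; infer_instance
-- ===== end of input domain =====

-- B replaces A's index-cursor scan of the full string (str.index with a start position, caught
-- ValueError) by repeatedly partition-ing the remaining suffix on the two markers.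

-- SENTENCE_START = '<s>' ;  SENTENCE_END = '</s>'
def pvSentStart : List Char := ['<', 's', '>']
def pvSentEnd : List Char := ['<', '/', 's', '>']

-- ===== PORT A =====

theorem pvFindFrom_lb (s sub : List Char) (st : Int) (hst : 0 ≤ st)
    (h : PySem.Chars.findFrom s sub st none ≠ -1) :
    st ≤ PySem.Chars.findFrom s sub st none ∧ st ≤ (s.length : Int) := by
  have hf := PySem.Chars.neg_one_le_find (List.drop st.toNat (List.take (s.length : Int).toNat s)) sub
  simp only [PySem.Chars.findFrom] at h ⊢
  split_ifs at h ⊢ <;> omega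

def afterfix2sentsGo (s : List Char) (cur : Nat) (sents : List String) : List String :=
  if hsp : PySem.Chars.findFrom s pvSentStart (cur : Int) none = -1 then sents
  else
    if hep : PySem.Chars.findFrom s pvSentEnd
        (PySem.Chars.findFrom s pvSentStart (cur : Int) none + 1) none = -1 then sents
    else
      afterfix2sentsGo s
        (PySem.Chars.findFrom s pvSentEnd
          (PySem.Chars.findFrom s pvSentStart (cur : Int) none + 1) none + 4).toNat
        (sents ++ [String.ofList (PySem.Chars.slice s
          (some (PySem.Chars.findFrom s pvSentStart (cur : Int) none + 3))
          (some (PySem.Chars.findFrom s pvSentEnd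
            (PySem.Chars.findFrom s pvSentStart (cur : Int) none + 1) none)))])
termination_by s.length + 1 - cur
decreasing_by
  have h1 := pvFindFrom_lb s pvSentStart (cur : Int) (by positivity) hsp
  have h2 := pvFindFrom_lb s pvSentEnd
    (PySem.Chars.findFrom s pvSentStart (cur : Int) none + 1) (by omega) hep
  omega


def afterfix2sents (afterfix : String) : List String :=
  afterfix2sentsGo afterfix.toList 0 []

-- ===== PORT B =====
-- hand port of str.partition(sep) -> (before, sep, after); sep component is [] iff sep is absent,
-- in which case Python returns (s, '', '') — exact on all inputs
def pyPartition (s sep : List Char) : List Char × List Char × List Char :=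
  if (PySem.Chars.find s sep) = -1 then (s, [], [])
  else (s.take (PySem.Chars.find s sep).toNat, sep,
        s.drop ((PySem.Chars.find s sep).toNat + sep.length))

theorem pvPartition_found (s sep : List Char) (h : (pyPartition s sep).2.1 ≠ []) :
    (pyPartition s sep).2.2.length + sep.length ≤ s.length := by
  unfold pyPartition at *
  by_cases hf : PySem.Chars.find s sep = -1
  · simp [hf] at h
  · have hinf : sep <:+: s := (PySem.Chars.find_ne_neg_one_iff s sep).mp hf
    have hlen := hinf.length_le
    simp only [hf, if_false] at h ⊢
    simp [List.length_drop]
    omega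

def afterfix2sentsAltGo (rest : List Char) (sents : List String) : List String :=
  if h1 : (pyPartition rest pvSentStart).2.1 = [] then sents
  else
    if h2 : (pyPartition (pyPartition rest pvSentStart).2.2 pvSentEnd).2.1 = [] then sents
    else
      afterfix2sentsAltGo (pyPartition (pyPartition rest pvSentStart).2.2 pvSentEnd).2.2
        (sents ++ [String.ofList (pyPartition (pyPartition rest pvSentStart).2.2 pvSentEnd).1])
termination_by rest.length
decreasing_by
  have k1 := pvPartition_found rest pvSentStart h1
  have k2 := pvPartition_found (pyPartition rest pvSentStart).2.2 pvSentEnd h2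
  have e1 : pvSentStart.length = 3 := rfl
  have e2 : pvSentEnd.length = 4 := rfl
  rw [e1] at k1; rw [e2] at k2
  omega


def afterfix2sents_alt (afterfix : String) : List String :=
  afterfix2sentsAltGo afterfix.toList []

-- ===== PRECONDITION & SPEC =====
def Spec_afterfix2sents (afterfix : String) (out : List String) : Prop := out = afterfix2sents_alt afterfix
instance (afterfix : String) (out : List String) : Decidable (Spec_afterfix2sents afterfix out) := by unfold Spec_afterfix2sents; infer_instance

-- ===== CLAIM (what is proved, stated in full; the proofs are below) =====
def Claim_equal_afterfix2sents : Prop := ∀ (afterfix : String), Dom_afterfix2sents afterfix → Spec_afterfix2sents afterfix (afterfix2sents afterfix)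

-- ===== LEMMAS AND PROOFS =====

theorem pvFindGo_shift (sub : List Char) (t : List Char) : ∀ (k : Nat),
    PySem.Chars.find.go sub t k =
      if PySem.Chars.find.go sub t 0 = -1 then -1 else PySem.Chars.find.go sub t 0 + k := by
  induction t with
  | nil =>
    intro k
    by_cases h : sub.isEmpty <;> simp [PySem.Chars.find.go, h]
  | cons c t ih =>
    intro k
    have hge : (-1 : Int) ≤ PySem.Chars.find.go sub t 0 := PySem.Chars.neg_one_le_find t sub
    by_cases h : sub.isPrefixOf (c :: t) <;> simp only [PySem.Chars.find.go, h, if_true]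
    · simp
    · rw [ih (k + 1), ih 1]
      by_cases h0 : PySem.Chars.find.go sub t 0 = -1 <;> simp [h0] <;> split_ifs <;> omega

theorem pvFind_cons (c : Char) (t sub : List Char) (h : sub.isPrefixOf (c :: t) = false) :
    PySem.Chars.find (c :: t) sub =
      if PySem.Chars.find t sub = -1 then -1 else PySem.Chars.find t sub + 1 := by
  have hge : (-1 : Int) ≤ PySem.Chars.find.go sub t 0 := PySem.Chars.neg_one_le_find t sub
  unfold PySem.Chars.find
  simp only [PySem.Chars.find.go, h]
  rw [pvFindGo_shift]
  by_cases h0 : PySem.Chars.find.go sub t 0 = -1 <;> simp [h0]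

theorem pvGo_eq (s : List Char) : ∀ (n cur : Nat) (sents : List String),
    s.length - cur = n → cur ≤ s.length →
    afterfix2sentsGo s cur sents = afterfix2sentsAltGo (s.drop cur) sents := by
  intro n
  induction n using Nat.strong_induction_on with
  | _ n ih =>
    intro cur sents hn hcur
    rw [afterfix2sentsGo, afterfix2sentsAltGo]
    rw [PySem.Chars.findFrom_natCast s pvSentStart cur hcur]
    by_cases hi : PySem.Chars.find (s.drop cur) pvSentStart = -1
    · simp [pyPartition, hi]
    · -- start marker found at offset i in d := s.drop cur
      have hge : 0 ≤ PySem.Chars.find (s.drop cur) pvSentStart := by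
        have := PySem.Chars.neg_one_le_find (s.drop cur) pvSentStart; omega
      set i : Nat := (PySem.Chars.find (s.drop cur) pvSentStart).toNat with hidef
      have hicast : PySem.Chars.find (s.drop cur) pvSentStart = (i : Int) := by
        rw [hidef, Int.toNat_of_nonneg hge]
      have hpre : pvSentStart <+: (s.drop cur).drop i :=
        (PySem.Chars.find_spec (by omega)).1
      obtain ⟨u, hu⟩ := hpre
      -- hu : pvSentStart ++ u = (s.drop cur).drop i
      have hulen : i + 3 ≤ (s.drop cur).length := by
        have := congrArg List.length hu
        simp [pvSentStart] at this
        simp only [List.length_drop]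
        omega
      have hu' : (s.drop cur).drop i = '<'::'s'::'>'::u := by
        rw [← hu]; rfl
      have hdu : s.drop (cur + (i + 3)) = u := by
        rw [← List.drop_drop, ← List.drop_drop, hu']; rfl
      have hd1 : s.drop (cur + (i + 1)) = 's'::'>'::u := by
        rw [← List.drop_drop, ← List.drop_drop, hu']; rfl
      have hlen' : cur + i + 3 ≤ s.length := by
        simp only [List.length_drop] at hulen; omega
      rw [if_neg hi, hicast]
      rw [dif_neg (by omega : ¬ ((cur : Int) + (i : Int) = -1))]
      have hc1 : ((cur : Int) + (i : Int) + 1) = ((cur + (i + 1) : ℕ) : ℤ) := by push_cast; ring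
      rw [hc1, PySem.Chars.findFrom_natCast s pvSentEnd (cur + (i + 1)) (by omega)]
      rw [hd1]
      rw [pvFind_cons 's' ('>'::u) pvSentEnd (by simp [pvSentEnd, List.isPrefixOf])]
      rw [pvFind_cons '>' u pvSentEnd (by simp [pvSentEnd, List.isPrefixOf])]
      have hPP1 : pyPartition (s.drop cur) pvSentStart = ((s.drop cur).take i, pvSentStart, u) := by
        rw [pyPartition, if_neg hi, hicast]
        simp [pvSentStart, List.drop_drop, hdu]
      rw [hPP1]
      rw [dif_neg (by simp [pvSentStart] : ¬ (((s.drop cur).take i, pvSentStart, u).2.1 = ([] : List Char)))]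
      by_cases hj : PySem.Chars.find u pvSentEnd = -1
      · -- no closing marker: both loops stop
        rw [hj]
        norm_num
        rw [pyPartition, if_pos hj]
        intro hcontra
        simp at hcontra
      · have hjge : 0 ≤ PySem.Chars.find u pvSentEnd := by
          have := PySem.Chars.neg_one_le_find u pvSentEnd; omega
        set j : Nat := (PySem.Chars.find u pvSentEnd).toNat with hjdef
        have hjcast : PySem.Chars.find u pvSentEnd = (j : Int) := by
          rw [hjdef, Int.toNat_of_nonneg hjge]
        have hpre2 : pvSentEnd <+: u.drop j :=
          (PySem.Chars.find_spec (by omega)).1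
        have hjlen : j + 4 ≤ u.length := by
          obtain ⟨v, hv⟩ := hpre2
          have := congrArg List.length hv
          simp [pvSentEnd] at this
          omega
        rw [hjcast]
        rw [if_neg (by omega : ¬ ((j : Int) = -1)),
            if_neg (by omega : ¬ ((j : Int) + 1 = -1)),
            if_neg (by omega : ¬ ((j : Int) + 1 + 1 = -1))]
        rw [dif_neg (by push_cast; omega :
          ¬ ((((cur + (i + 1) : ℕ) : ℤ)) + ((j : Int) + 1 + 1) = -1))]
        have hPP2 : pyPartition u pvSentEnd = (u.take j, pvSentEnd, u.drop (j + 4)) := by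
          rw [pyPartition, if_neg hj, hjcast]
          simp [pvSentEnd]
        rw [hPP2]
        rw [dif_neg (by simp [pvSentEnd] : ¬ ((u.take j, pvSentEnd, u.drop (j + 4)).2.1 = ([] : List Char)))]
        -- the appended sentence is the same on both sides
        have hslice : PySem.Chars.slice s (some ((cur : Int) + (i : Int) + 3))
            (some (((cur + (i + 1) : ℕ) : ℤ) + ((j : Int) + 1 + 1))) = u.take j := by
          have e1 : ((cur : Int) + (i : Int) + 3) = ((cur + (i + 3) : ℕ) : ℤ) := by push_cast; ring
          have e2 : (((cur + (i + 1) : ℕ) : ℤ) + ((j : Int) + 1 + 1)) = ((cur + (i + 3) + j : ℕ) : ℤ) := by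
            push_cast; ring
          rw [e1, e2]
          unfold PySem.Chars.slice
          rw [PySem.List.slice_natCast]
          rw [Nat.add_sub_cancel_left, hdu]
        rw [hslice]
        -- both loops continue on the same state
        have e3 : ((((cur + (i + 1) : ℕ) : ℤ) + ((j : Int) + 1 + 1)) + 4).toNat = cur + (i + (j + 7)) := by
          push_cast; omega
        rw [e3]
        have e4 : u.drop (j + 4) = s.drop (cur + (i + (j + 7))) := by
          rw [← hdu, List.drop_drop]
          congr 1
          omega
        rw [e4]
        have hlen2 : cur + (i + (j + 7)) ≤ s.length := by
          simp only [List.length_drop, ← hdu] at hjlen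
          omega
        exact ih (s.length - (cur + (i + (j + 7)))) (by omega) _ _ rfl hlen2

-- ===== VERDICT (by name: the statement is the Claim_ definition above) =====
theorem afterfix2sents_spec : Claim_equal_afterfix2sents := by
  intro afterfix _
  unfold Spec_afterfix2sents afterfix2sents afterfix2sents_alt
  simpa using pvGo_eq afterfix.toList afterfix.toList.length 0 [] rfl (by omega)
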